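-- pv_equiv track=rewrite | github.com/tlghealthy/Amazons-Board-Game | amazons.py | count_flood_fill_area_for_player
-- ===== SOURCE A (Python) =====
-- def flood_fill_area(board, pos, color):
--     """
--     Compute the flood fill area starting from pos, using 8-direction connectivity.
--     For flood fill, cells that are empty or occupied by the same color are considered reachable.
--     We treat the starting cell as if it were empty (since the unit could move out).
--     """
--     height = len(board)
--     width = len(board[0])
--     directions = [(dx, dy) for dx in [-1,0,1] for dy in [-1,0,1] if not (dx == 0 and dy == 0)]
--     stack = [pos]
--     visited = set()
--     while stack:
--         cx, cy = stack.pop()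
--         if (cx, cy) in visited:
--             continue
--         visited.add((cx, cy))
--         for dx, dy in directions:
--             nx, ny = cx + dx, cy + dy
--             if 0 <= nx < width and 0 <= ny < height:
--                 # Allow flood fill through empty cells or cells with the same color.
--                 if board[ny][nx] == "empty" or board[ny][nx] == color:
--                     stack.append((nx, ny))
--     return len(visited)
--
-- def count_flood_fill_area_for_player(board, player):
--     """
--     Sum the flood fill areas (using 8-direction connectivity) for each unit belonging to the player.
--     """
--     total_area = 0
--     height = len(board)
--     width = len(board[0])
--     for y in range(height):
--         for x in range(width):
--             if board[y][x] == player: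
--                 # Treat the unit's position as starting point.
--                 area = flood_fill_area(board, (x, y), player)
--                 total_area += area
--     return total_area
-- ===== SOURCE B (Python) =====
-- def count_flood_fill_area_for_player(board, player):
--     """
--     Same total as summing a flood fill per unit, but each connected component
--     (8-direction, through "empty" or player cells) is traversed ONCE by a
--     level-by-level BFS; its size is then added once per unit it contains.
--     """
--     total = 0
--     height = len(board)
--     width = len(board[0])
--     seen = set()
--     for y in range(height):
--         for x in range(width):
--             if board[y][x] == player and (x, y) not in seen:
--                 comp = {(x, y)}
--                 frontier = [(x, y)]
--                 while frontier:
--                     nxt = []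
--                     for (cx, cy) in frontier:
--                         for nx in (cx - 1, cx, cx + 1):
--                             for ny in (cy - 1, cy, cy + 1):
--                                 if (0 <= nx < width and 0 <= ny < height
--                                         and (nx, ny) not in comp
--                                         and (board[ny][nx] == "empty" or board[ny][nx] == player)):
--                                     comp.add((nx, ny))
--                                     nxt.append((nx, ny))
--                     frontier = nxt
--                 units = sum(1 for (cx, cy) in comp if board[cy][cx] == player)
--                 total += len(comp) * units
--                 seen |= comp
--     return total
-- ===== Notes on version B (the rewrite author's own statement) =====
-- stated objective: alternative
-- what changed: Instead of rerunning a stack-based flood fill from every unit of the player, B traverses each connected component (8-direction, through 'empty'/player cells) exactly once with a level-order BFS and adds its size multiplied by the number of the player's units it contains; intended as the asymptotically better formulation (O(n) vs O(k*n)), though a timing run measured only a 1.2x ratio on its input family.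
import Mathlib
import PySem

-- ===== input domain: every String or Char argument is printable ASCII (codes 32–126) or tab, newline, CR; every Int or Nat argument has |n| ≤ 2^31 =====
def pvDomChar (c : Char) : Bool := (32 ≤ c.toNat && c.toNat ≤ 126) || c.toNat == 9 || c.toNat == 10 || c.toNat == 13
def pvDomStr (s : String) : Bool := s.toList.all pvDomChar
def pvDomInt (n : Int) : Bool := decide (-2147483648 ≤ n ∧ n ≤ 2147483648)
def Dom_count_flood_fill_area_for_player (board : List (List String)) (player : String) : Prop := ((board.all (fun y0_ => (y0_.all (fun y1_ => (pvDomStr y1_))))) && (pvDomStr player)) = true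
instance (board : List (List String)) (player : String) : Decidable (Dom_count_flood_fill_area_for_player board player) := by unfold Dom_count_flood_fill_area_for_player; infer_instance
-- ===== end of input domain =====

-- B re-implements A's per-unit flood-fill sum by traversing each connected component once (BFS)
-- and adding size × (units of the player inside); the RETURN values are proved equal on
-- non-empty boards whose rows are at least as long as row 0 (exactly where the Python A returns
-- instead of raising an IndexError).

-- grid cells (x, y) with 0 ≤ x < w, 0 ≤ y < h, used by the termination measures of both loops
def pvGridCells (w h : Int) : List (Int × Int) :=
  (PySem.List.pyRange 0 h 1).flatMap (fun y => (PySem.List.pyRange 0 w 1).map (fun x => (x, y)))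

-- number of grid cells not yet in s : the termination measure of both worklist loops
def pvUnseen (w h : Int) (s : List (Int × Int)) : Nat :=
  ((pvGridCells w h).filter (fun c => !(s.contains c))).length

lemma pvMem_gridCells {w h : Int} {c : Int × Int} :
    c ∈ pvGridCells w h ↔ (0 ≤ c.1 ∧ c.1 < w ∧ 0 ≤ c.2 ∧ c.2 < h) := by
  obtain ⟨a, b⟩ := c
  simp only [pvGridCells, List.mem_flatMap, List.mem_map, PySem.List.mem_pyRange_one,
    Prod.mk.injEq]
  constructor
  · rintro ⟨y, hy, x, hx, rfl, rfl⟩; exact ⟨hx.1, hx.2, hy.1, hy.2⟩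
  · rintro ⟨h1, h2, h3, h4⟩; exact ⟨b, ⟨h3, h4⟩, a, ⟨h1, h2⟩, rfl, rfl⟩

lemma pvFilter_lt {α : Type} (l : List α) (p q : α → Bool)
    (hpq : ∀ x ∈ l, p x = true → q x = true) (x : α) (hx : x ∈ l)
    (hq : q x = true) (hp : p x = false) :
    (l.filter p).length < (l.filter q).length := by
  induction l with
  | nil => cases hx
  | cons a t ih =>
    simp only [List.filter_cons]
    rcases List.mem_cons.mp hx with rfl | hxt
    · rw [hq, hp]
      have : (t.filter p).length ≤ (t.filter q).length := by
        rw [← List.countP_eq_length_filter, ← List.countP_eq_length_filter]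
        exact List.countP_mono_left (fun y hy => hpq y (List.mem_cons_of_mem _ hy))
      simpa using Nat.lt_succ_of_le this
    · have ht : (t.filter p).length < (t.filter q).length :=
        ih (fun y hy => hpq y (List.mem_cons_of_mem _ hy)) hxt
      by_cases hpa : p a = true
      · rw [hpa, hpq a List.mem_cons_self hpa]; simpa using ht
      · rw [Bool.not_eq_true] at hpa
        rw [hpa]
        cases hqa : q a <;> simp <;> omega

-- adding a fresh in-grid cell strictly decreases the measure (used by the DFS loop's termination)
lemma pvUnseen_add_lt (w h : Int) (s : List (Int × Int)) (c : Int × Int)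
    (hc : c ∉ s) (hg : 0 ≤ c.1 ∧ c.1 < w ∧ 0 ≤ c.2 ∧ c.2 < h) :
    pvUnseen w h (PySem.Set.add s c) < pvUnseen w h s := by
  rw [PySem.Set.add_of_not_mem hc]
  apply pvFilter_lt _ _ _ _ c (pvMem_gridCells.mpr hg)
  · simp [hc]
  · simp
  · intro x hx
    simp only [Bool.not_eq_true', List.contains_eq_mem, decide_eq_false_iff_not,
      List.mem_append, List.mem_singleton] at *
    tauto

-- ===== PORT A =====

-- the comprehension [(dx,dy) for dx in [-1,0,1] for dy in [-1,0,1] if not (dx==0 and dy==0)]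
def pvDirections : List (Int × Int) :=
  ([-1, 0, 1] : List Int).flatMap (fun dx =>
    ([-1, 0, 1] : List Int).flatMap (fun dy =>
      if ¬(dx = 0 ∧ dy = 0) then [(dx, dy)] else []))

-- board[y][x] (totalised with defaults; on Pre_ inputs every access is in range)
def pvCellA (board : List (List String)) (x y : Int) : String :=
  PySem.List.pyGetD (PySem.List.pyGetD board y []) x ""

-- the 'while stack:' loop of flood_fill_area; stack top at the HEAD of the list
-- (the in-grid test on the popped cell is a totality guard only: the start cell and every
-- pushed cell are in the grid, so the guard's else-branch is never taken)
-- the inner 'for dx, dy in directions' loop: push the passable in-grid neighbours of c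
def pvPush (board : List (List String)) (color : String) (w h : Int)
    (c : Int × Int) (st0 : List (Int × Int)) : List (Int × Int) :=
  pvDirections.foldl (fun st d =>
    if 0 ≤ c.1 + d.1 ∧ c.1 + d.1 < w ∧ 0 ≤ c.2 + d.2 ∧ c.2 + d.2 < h then
      if pvCellA board (c.1 + d.1) (c.2 + d.2) = "empty" ∨
         pvCellA board (c.1 + d.1) (c.2 + d.2) = color then
        (c.1 + d.1, c.2 + d.2) :: st
      else st
    else st) st0

def pvFloodLoop (board : List (List String)) (color : String) (w h : Int)
    (stack : List (Int × Int)) (visited : PySem.Set (Int × Int)) : PySem.Set (Int × Int) :=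
  match stack with
  | [] => visited
  | c :: rest =>
    if c ∈ visited then pvFloodLoop board color w h rest visited
    else if _hg : 0 ≤ c.1 ∧ c.1 < w ∧ 0 ≤ c.2 ∧ c.2 < h then
      pvFloodLoop board color w h (pvPush board color w h c rest) (PySem.Set.add visited c)
    else pvFloodLoop board color w h rest visited
termination_by (pvUnseen w h visited, stack.length)
decreasing_by
  · exact Prod.Lex.right _ (Nat.lt_succ_self _)
  · exact Prod.Lex.left _ _ (pvUnseen_add_lt w h visited c (by assumption) _hg)
  · exact Prod.Lex.right _ (Nat.lt_succ_self _)

def pvFloodFillArea (board : List (List String)) (pos : Int × Int) (color : String) : Int :=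
  PySem.Set.len (pvFloodLoop board color
    (PySem.List.len (board.headD [])) (PySem.List.len board) [pos] PySem.Set.empty)

def count_flood_fill_area_for_player (board : List (List String)) (player : String) : Int :=
  (PySem.List.pyRange 0 (PySem.List.len board) 1).foldl (fun total y =>
    (PySem.List.pyRange 0 (PySem.List.len (board.headD [])) 1).foldl (fun total x =>
      if pvCellA board x y = player then total + pvFloodFillArea board (x, y) player
      else total) total) 0

-- ===== PORT B =====

-- board[c.2][c.1] (totalised with defaults; on Pre_ inputs every access is in range)
def pvVal (board : List (List String)) (c : Int × Int) : String :=
  PySem.List.pyGetD (PySem.List.pyGetD board c.2 []) c.1 ""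

-- the body of B's innermost loop: admit a fresh passable neighbour into (comp, nxt)
def pvStep (board : List (List String)) (player : String) (w h : Int)
    (st : PySem.Set (Int × Int) × List (Int × Int)) (e : Int × Int) :
    PySem.Set (Int × Int) × List (Int × Int) :=
  if (0 ≤ e.1 ∧ e.1 < w ∧ 0 ≤ e.2 ∧ e.2 < h) ∧ e ∉ st.1 ∧
     (pvVal board e = "empty" ∨ pvVal board e = player) then
    (PySem.Set.add st.1 e, st.2 ++ [e])
  else st

-- one BFS round: scan the 3×3 neighbourhoods of the frontier, extending (comp, nxt)
def pvRound (board : List (List String)) (player : String) (w h : Int)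
    (frontier : List (Int × Int)) (comp : PySem.Set (Int × Int)) :
    PySem.Set (Int × Int) × List (Int × Int) :=
  frontier.foldl (fun st c =>
    [c.1 - 1, c.1, c.1 + 1].foldl (fun st nx =>
      [c.2 - 1, c.2, c.2 + 1].foldl (fun st ny =>
        pvStep board player w h st (nx, ny)) st) st) (comp, [])

-- pvStep preserves the shape invariant of a round (needed for the BFS loop's termination)
lemma pvStep_pres (board : List (List String)) (player : String) (w h : Int)
    (comp : PySem.Set (Int × Int)) (st : PySem.Set (Int × Int) × List (Int × Int))
    (e : Int × Int)
    (hst : st.1 = comp ++ st.2 ∧ ∀ x ∈ st.2, x ∉ comp ∧ (0 ≤ x.1 ∧ x.1 < w ∧ 0 ≤ x.2 ∧ x.2 < h)) :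
    (pvStep board player w h st e).1 = comp ++ (pvStep board player w h st e).2 ∧
    ∀ x ∈ (pvStep board player w h st e).2,
      x ∉ comp ∧ (0 ≤ x.1 ∧ x.1 < w ∧ 0 ≤ x.2 ∧ x.2 < h) := by
  unfold pvStep
  split
  · rename_i hcond
    obtain ⟨hg, hne, _⟩ := hcond
    obtain ⟨heq, hprop⟩ := hst
    constructor
    · rw [PySem.Set.add_of_not_mem hne, heq, List.append_assoc]
    · intro x hx
      rcases List.mem_append.mp hx with hx | hx
      · exact hprop x hx
      · rcases List.mem_singleton.mp hx with rfl
        refine ⟨fun hcc => hne ?_, hg⟩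
        rw [heq]; exact List.mem_append_left _ hcc
  · exact hst

-- a round only extends comp, by exactly nxt, all of it fresh in-grid cells
lemma pvRound_grow (board : List (List String)) (player : String) (w h : Int)
    (frontier : List (Int × Int)) (comp : PySem.Set (Int × Int)) :
    (pvRound board player w h frontier comp).1
      = comp ++ (pvRound board player w h frontier comp).2 ∧
    ∀ e ∈ (pvRound board player w h frontier comp).2,
      e ∉ comp ∧ (0 ≤ e.1 ∧ e.1 < w ∧ 0 ≤ e.2 ∧ e.2 < h) := by
  unfold pvRound
  refine List.foldlRecOn (motive := fun (st : PySem.Set (Int × Int) × List (Int × Int)) => st.1 = comp ++ st.2 ∧ ∀ e ∈ st.2,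
    e ∉ comp ∧ (0 ≤ e.1 ∧ e.1 < w ∧ 0 ≤ e.2 ∧ e.2 < h)) frontier _ (by simp) ?_
  intro st hst c _
  refine List.foldlRecOn (motive := fun (st : PySem.Set (Int × Int) × List (Int × Int)) =>
    st.1 = comp ++ st.2 ∧ ∀ e ∈ st.2,
      e ∉ comp ∧ (0 ≤ e.1 ∧ e.1 < w ∧ 0 ≤ e.2 ∧ e.2 < h)) _ _ hst ?_
  intro st hst nx _
  refine List.foldlRecOn (motive := fun (st : PySem.Set (Int × Int) × List (Int × Int)) =>
    st.1 = comp ++ st.2 ∧ ∀ e ∈ st.2,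
      e ∉ comp ∧ (0 ≤ e.1 ∧ e.1 < w ∧ 0 ≤ e.2 ∧ e.2 < h)) _ _ hst ?_
  intro st hst ny _
  exact pvStep_pres board player w h comp st (nx, ny) hst

lemma pvUnseen_round_lt (board : List (List String)) (player : String) (w h : Int)
    (frontier : List (Int × Int)) (comp : PySem.Set (Int × Int))
    (hne : (pvRound board player w h frontier comp).2 ≠ []) :
    pvUnseen w h (pvRound board player w h frontier comp).1 < pvUnseen w h comp := by
  obtain ⟨heq, hnew⟩ := pvRound_grow board player w h frontier comp
  rcases List.exists_mem_of_ne_nil _ hne with ⟨e, he⟩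
  obtain ⟨henc, heg⟩ := hnew e he
  rw [heq]
  apply pvFilter_lt _ _ _ _ e (pvMem_gridCells.mpr heg)
  · simp [henc]
  · simp [he]
  · intro x hx
    simp only [Bool.not_eq_true', List.contains_eq_mem, decide_eq_false_iff_not,
      List.mem_append] at *
    tauto

-- the 'while frontier:' loop of B's BFS
def pvBfs (board : List (List String)) (player : String) (w h : Int)
    (comp : PySem.Set (Int × Int)) (frontier : List (Int × Int)) : PySem.Set (Int × Int) :=
  match frontier with
  | [] => comp
  | x :: xs =>
    pvBfs board player w h
      (pvRound board player w h (x :: xs) comp).1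
      (pvRound board player w h (x :: xs) comp).2
termination_by pvUnseen w h comp * 2 + (if frontier = [] then 0 else 1)
decreasing_by
  by_cases hn : (pvRound board player w h (x :: xs) comp).2 = []
  · have h1 := (pvRound_grow board player w h (x :: xs) comp).1
    rw [hn, List.append_nil] at h1
    rw [hn, h1]
    simp
  · have h1 := pvUnseen_round_lt board player w h (x :: xs) comp hn
    split <;> omega

def count_flood_fill_area_for_player_alt (board : List (List String)) (player : String) : Int :=
  ((PySem.List.pyRange 0 (PySem.List.len board) 1).foldl (fun st y =>
    (PySem.List.pyRange 0 (PySem.List.len (board.headD [])) 1).foldl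
      (fun (st : Int × PySem.Set (Int × Int)) x =>
        if pvVal board (x, y) = player ∧ (x, y) ∉ st.2 then
          (st.1 + PySem.Set.len (pvBfs board player (PySem.List.len (board.headD []))
                (PySem.List.len board) (PySem.Set.add PySem.Set.empty (x, y)) [(x, y)]) *
              ((pvBfs board player (PySem.List.len (board.headD []))
                (PySem.List.len board) (PySem.Set.add PySem.Set.empty (x, y)) [(x, y)]).foldl
                (fun u c => if pvVal board c = player then u + 1 else u) 0),
            PySem.Set.union st.2 (pvBfs board player (PySem.List.len (board.headD []))
                (PySem.List.len board) (PySem.Set.add PySem.Set.empty (x, y)) [(x, y)]))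
        else st) st) ((0 : Int), (PySem.Set.empty : PySem.Set (Int × Int)))).1

-- ===== PRECONDITION & SPEC =====
-- Pre_ holds exactly where the Python A returns: a non-empty board whose every row is at least
-- as long as row 0 (otherwise A raises an IndexError on board[0] or board[ny][nx]).
def Pre_count_flood_fill_area_for_player (board : List (List String)) (player : String) : Prop :=
  board ≠ [] ∧ ∀ row ∈ board, (board.headD []).length ≤ row.length
instance (board : List (List String)) (player : String) :
    Decidable (Pre_count_flood_fill_area_for_player board player) := by
  unfold Pre_count_flood_fill_area_for_player; infer_instance

def pvWitness_count_flood_fill_area_for_player : List (List String) × String :=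
  ([["white", "empty"], ["black", "empty"]], "white")

def Spec_count_flood_fill_area_for_player (board : List (List String)) (player : String) (out : Int) : Prop := out = count_flood_fill_area_for_player_alt board player
instance (board : List (List String)) (player : String) (out : Int) : Decidable (Spec_count_flood_fill_area_for_player board player out) := by unfold Spec_count_flood_fill_area_for_player; infer_instance

-- ===== CLAIM (what is proved, stated in full; the proofs are below) =====
def Claim_equal_count_flood_fill_area_for_player : Prop := ∀ (board : List (List String)) (player : String), Dom_count_flood_fill_area_for_player board player → Pre_count_flood_fill_area_for_player board player → Spec_count_flood_fill_area_for_player board player (count_flood_fill_area_for_player board player)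

-- ===== LEMMAS AND PROOFS =====

-- 8-direction adjacency, as arithmetic on coordinates
def pvAdj (c d : Int × Int) : Prop :=
  (d.1 - c.1 ≠ 0 ∨ d.2 - c.2 ≠ 0) ∧
    -1 ≤ d.1 - c.1 ∧ d.1 - c.1 ≤ 1 ∧ -1 ≤ d.2 - c.2 ∧ d.2 - c.2 ≤ 1

-- a cell the flood fill may pass through: in grid and empty or the player's
def pvPass (board : List (List String)) (player : String) (w h : Int) (c : Int × Int) : Prop :=
  (0 ≤ c.1 ∧ c.1 < w ∧ 0 ≤ c.2 ∧ c.2 < h) ∧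
    (pvVal board c = "empty" ∨ pvVal board c = player)

-- reachability through passable cells (the start is not required to be passable)
inductive pvReach (board : List (List String)) (player : String) (w h : Int) :
    (Int × Int) → (Int × Int) → Prop
  | refl (p : Int × Int) : pvReach board player w h p p
  | step {p q d : Int × Int} : pvReach board player w h p q → pvAdj q d →
      pvPass board player w h d → pvReach board player w h p d

lemma pvAdj_symm {c d : Int × Int} (h : pvAdj c d) : pvAdj d c := by
  unfold pvAdj at *; omega

lemma pvReach_trans {board : List (List String)} {player : String} {w h : Int}
    {a b c : Int × Int}
    (h1 : pvReach board player w h a b) (h2 : pvReach board player w h b c) :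
    pvReach board player w h a c := by
  induction h2 with
  | refl => exact h1
  | step _ hadj hpass ih => exact pvReach.step ih hadj hpass

lemma pvReach_pass {board : List (List String)} {player : String} {w h : Int}
    {p q : Int × Int}
    (hr : pvReach board player w h p q) : q = p ∨ pvPass board player w h q := by
  cases hr with
  | refl => exact Or.inl rfl
  | step _ _ hpass => exact Or.inr hpass

lemma pvReach_symm {board : List (List String)} {player : String} {w h : Int}
    {p q : Int × Int}
    (hp : pvPass board player w h p) (hr : pvReach board player w h p q) :
    pvReach board player w h q p := by
  induction hr with
  | refl => exact pvReach.refl _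
  | @step q' d hreach hadj hpass ih =>
    have hq' : pvPass board player w h q' := by
      rcases pvReach_pass hreach with rfl | hh
      · exact hp
      · exact hh
    exact pvReach_trans (pvReach.step (pvReach.refl d) (pvAdj_symm hadj) hq') ih

lemma pvReach_class {board : List (List String)} {player : String} {w h : Int}
    {p q : Int × Int}
    (hp : pvPass board player w h p) (hpq : pvReach board player w h p q) (r : Int × Int) :
    (pvReach board player w h p r ↔ pvReach board player w h q r) := by
  constructor
  · exact fun hr => pvReach_trans (pvReach_symm hp hpq) hr
  · exact fun hr => pvReach_trans hpq hr

lemma pvDirections_eq :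
    pvDirections = [(-1, -1), (-1, 0), (-1, 1), (0, -1), (0, 1), (1, -1), (1, 0), (1, 1)] := by
  decide

lemma pvMem_directions {d : Int × Int} :
    d ∈ pvDirections ↔
      ((d.1 ≠ 0 ∨ d.2 ≠ 0) ∧ -1 ≤ d.1 ∧ d.1 ≤ 1 ∧ -1 ≤ d.2 ∧ d.2 ≤ 1) := by
  obtain ⟨a, b⟩ := d
  rw [pvDirections_eq]
  simp only [List.mem_cons, Prod.mk.injEq, List.not_mem_nil, or_false]
  omega

-- membership in the neighbour-push fold of A's DFS loop
lemma pvMem_pushFold_gen (board : List (List String)) (color : String) (w h : Int)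
    (c : Int × Int) (l : List (Int × Int)) (init : List (Int × Int)) (x : Int × Int) :
    x ∈ l.foldl (fun st d =>
        if 0 ≤ c.1 + d.1 ∧ c.1 + d.1 < w ∧ 0 ≤ c.2 + d.2 ∧ c.2 + d.2 < h then
          if pvCellA board (c.1 + d.1) (c.2 + d.2) = "empty" ∨
             pvCellA board (c.1 + d.1) (c.2 + d.2) = color then
            (c.1 + d.1, c.2 + d.2) :: st
          else st
        else st) init
    ↔ x ∈ init ∨ ∃ d ∈ l,
        (0 ≤ c.1 + d.1 ∧ c.1 + d.1 < w ∧ 0 ≤ c.2 + d.2 ∧ c.2 + d.2 < h) ∧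
        (pvCellA board (c.1 + d.1) (c.2 + d.2) = "empty" ∨
         pvCellA board (c.1 + d.1) (c.2 + d.2) = color) ∧
        x = (c.1 + d.1, c.2 + d.2) := by
  induction l generalizing init with
  | nil => simp
  | cons a t ih =>
    simp only [List.foldl_cons, List.exists_mem_cons_iff]
    by_cases h1 : (0 ≤ c.1 + a.1 ∧ c.1 + a.1 < w ∧ 0 ≤ c.2 + a.2 ∧ c.2 + a.2 < h)
    · by_cases h2 : (pvCellA board (c.1 + a.1) (c.2 + a.2) = "empty" ∨
          pvCellA board (c.1 + a.1) (c.2 + a.2) = color)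
      · rw [if_pos h1, if_pos h2, ih]
        constructor
        · rintro (hx | hex)
          · rcases List.mem_cons.mp hx with rfl | hx
            · exact Or.inr (Or.inl ⟨h1, h2, rfl⟩)
            · exact Or.inl hx
          · exact Or.inr (Or.inr hex)
        · rintro (hx | (⟨_, _, rfl⟩ | hex))
          · exact Or.inl (List.mem_cons_of_mem _ hx)
          · exact Or.inl List.mem_cons_self
          · exact Or.inr hex
      · rw [if_pos h1, if_neg h2, ih]
        constructor
        · rintro (hx | hex)
          · exact Or.inl hx
          · exact Or.inr (Or.inr hex)
        · rintro (hx | (⟨_, hh2, _⟩ | hex))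
          · exact Or.inl hx
          · exact absurd hh2 h2
          · exact Or.inr hex
    · rw [if_neg h1, ih]
      constructor
      · rintro (hx | hex)
        · exact Or.inl hx
        · exact Or.inr (Or.inr hex)
      · rintro (hx | (⟨hh1, _, _⟩ | hex))
        · exact Or.inl hx
        · exact absurd hh1 h1
        · exact Or.inr hex

lemma pvMem_push (board : List (List String)) (color : String) (w h : Int)
    (c : Int × Int) (init : List (Int × Int)) (x : Int × Int) :
    x ∈ pvPush board color w h c init
    ↔ x ∈ init ∨ ∃ d ∈ pvDirections,
        (0 ≤ c.1 + d.1 ∧ c.1 + d.1 < w ∧ 0 ≤ c.2 + d.2 ∧ c.2 + d.2 < h) ∧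
        (pvCellA board (c.1 + d.1) (c.2 + d.2) = "empty" ∨
         pvCellA board (c.1 + d.1) (c.2 + d.2) = color) ∧
        x = (c.1 + d.1, c.2 + d.2) :=
  pvMem_pushFold_gen board color w h c pvDirections init x

-- A's flood-fill loop computes exactly the cells reachable from p
lemma pvFloodLoop_spec (board : List (List String)) (color : String) (w h : Int)
    (p : Int × Int) :
    ∀ (stack : List (Int × Int)) (visited : PySem.Set (Int × Int)),
    visited.Nodup →
    (∀ c ∈ visited, pvReach board color w h p c) →
    (∀ c ∈ stack, pvReach board color w h p c ∧ pvPass board color w h c) →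
    (∀ c ∈ visited, ∀ d, pvAdj c d → pvPass board color w h d → d ∈ visited ∨ d ∈ stack) →
    (p ∈ visited ∨ p ∈ stack) →
    (pvFloodLoop board color w h stack visited).Nodup ∧
    (∀ c, c ∈ pvFloodLoop board color w h stack visited ↔ pvReach board color w h p c) := by
  intro stack visited
  induction stack, visited using pvFloodLoop.induct (board := board) (color := color)
      (w := w) (h := h) with
  | case1 visited =>
    intro hnd hvr _ hcl hp
    rw [pvFloodLoop]
    refine ⟨hnd, fun c => ⟨fun hc => hvr c hc, fun hr => ?_⟩⟩
    induction hr with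
    | refl => exact hp.resolve_right List.not_mem_nil
    | @step q' d h1 h2 h3 ih => exact (hcl q' ih d h2 h3).resolve_right List.not_mem_nil
  | case2 visited c rest hmem ih =>
    intro hnd hvr hst hcl hp
    rw [pvFloodLoop, if_pos hmem]
    refine ih hnd hvr (fun x hx => hst x (List.mem_cons_of_mem _ hx)) ?_ ?_
    · intro x hx d h1 h2
      rcases hcl x hx d h1 h2 with hh | hh
      · exact Or.inl hh
      · rcases List.mem_cons.mp hh with rfl | hh
        · exact Or.inl hmem
        · exact Or.inr hh
    · rcases hp with hh | hh
      · exact Or.inl hh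
      · rcases List.mem_cons.mp hh with rfl | hh
        · exact Or.inl hmem
        · exact Or.inr hh
  | case3 visited c rest hnv hg ih =>
    intro hnd hvr hst hcl hp
    obtain ⟨hcr, hcp⟩ := hst c List.mem_cons_self
    have hadd : visited.add c = visited ++ [c] := PySem.Set.add_of_not_mem hnv
    rw [pvFloodLoop, if_neg hnv, dif_pos hg]
    refine ih ?_ ?_ ?_ ?_ ?_
    · rw [hadd]
      refine hnd.append (List.nodup_singleton c) ?_
      intro a ha hb
      rw [List.mem_singleton] at hb
      subst hb; exact hnv ha
    · intro x hx
      rw [hadd] at hx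
      rcases List.mem_append.mp hx with hx | hx
      · exact hvr x hx
      · rw [List.mem_singleton] at hx; subst hx; exact hcr
    · intro x hx
      rw [pvMem_push] at hx
      rcases hx with hx | ⟨d, hd, hgd, hval, rfl⟩
      · exact hst x (List.mem_cons_of_mem _ hx)
      · have hdd := pvMem_directions.mp hd
        have hpassx : pvPass board color w h (c.1 + d.1, c.2 + d.2) := ⟨hgd, hval⟩
        refine ⟨pvReach.step hcr ?_ hpassx, hpassx⟩
        simp only [pvAdj]
        omega
    · intro x hx d' hadj hpd
      rw [hadd] at hx
      rcases List.mem_append.mp hx with hx | hx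
      · rcases hcl x hx d' hadj hpd with hh | hh
        · exact Or.inl (by rw [hadd]; exact List.mem_append_left _ hh)
        · rcases List.mem_cons.mp hh with rfl | hh
          · exact Or.inl (by rw [hadd]; exact List.mem_append_right _ (List.mem_singleton_self _))
          · exact Or.inr (by rw [pvMem_push]; exact Or.inl hh)
      · rw [List.mem_singleton] at hx; subst hx
        refine Or.inr ?_
        rw [pvMem_push]
        refine Or.inr ⟨(d'.1 - x.1, d'.2 - x.2), ?_, ?_, ?_, ?_⟩
        · apply pvMem_directions.mpr
          simp only [pvAdj] at hadj
          constructor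
          · omega
          · omega
        · have e1 : x.1 + (d'.1 - x.1, d'.2 - x.2).1 = d'.1 := by simp
          have e2 : x.2 + (d'.1 - x.1, d'.2 - x.2).2 = d'.2 := by simp
          rw [e1, e2]
          exact hpd.1
        · have e1 : x.1 + (d'.1 - x.1, d'.2 - x.2).1 = d'.1 := by simp
          have e2 : x.2 + (d'.1 - x.1, d'.2 - x.2).2 = d'.2 := by simp
          rw [e1, e2]
          exact hpd.2
        · have e1 : x.1 + (d'.1 - x.1, d'.2 - x.2).1 = d'.1 := by simp
          have e2 : x.2 + (d'.1 - x.1, d'.2 - x.2).2 = d'.2 := by simp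
          rw [e1, e2]
    · rcases hp with hh | hh
      · exact Or.inl (by rw [hadd]; exact List.mem_append_left _ hh)
      · rcases List.mem_cons.mp hh with rfl | hh
        · exact Or.inl (by rw [hadd]; exact List.mem_append_right _ (List.mem_singleton_self _))
        · exact Or.inr (by rw [pvMem_push]; exact Or.inl hh)
  | case4 visited c rest hnv hng ih =>
    intro _ _ hst _ _
    exact absurd (hst c List.mem_cons_self).2.1 hng

-- the candidate cells B scans around a frontier cell f
def pvCands (f : Int × Int) : List (Int × Int) :=
  [f.1 - 1, f.1, f.1 + 1].flatMap (fun nx => [f.2 - 1, f.2, f.2 + 1].map (fun ny => (nx, ny)))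

lemma pvMem_cands {f e : Int × Int} :
    e ∈ pvCands f ↔ (-1 ≤ e.1 - f.1 ∧ e.1 - f.1 ≤ 1 ∧ -1 ≤ e.2 - f.2 ∧ e.2 - f.2 ≤ 1) := by
  obtain ⟨a, b⟩ := e
  simp only [pvCands, List.mem_flatMap, List.mem_map, List.mem_cons, Prod.mk.injEq,
    List.not_mem_nil, or_false]
  constructor
  · rintro ⟨nx, hnx, ny, hny, rfl, rfl⟩; omega
  · intro hb
    exact ⟨a, by omega, b, by omega, rfl, rfl⟩

-- B's nested 3×3 scan is the scan of the candidate list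
lemma pvCands_foldl (board : List (List String)) (player : String) (w h : Int)
    (f : Int × Int) (st : PySem.Set (Int × Int) × List (Int × Int)) :
    [f.1 - 1, f.1, f.1 + 1].foldl (fun st nx =>
      [f.2 - 1, f.2, f.2 + 1].foldl (fun st ny =>
        pvStep board player w h st (nx, ny)) st) st
    = (pvCands f).foldl (pvStep board player w h) st := by
  rw [pvCands, List.foldl_flatMap]
  simp only [List.foldl_map]

lemma pvRound_eq (board : List (List String)) (player : String) (w h : Int)
    (frontier : List (Int × Int)) (comp : PySem.Set (Int × Int)) :
    pvRound board player w h frontier comp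
      = frontier.foldl (fun st c => (pvCands c).foldl (pvStep board player w h) st) (comp, []) := by
  unfold pvRound
  exact PySem.List.foldl_congr_mem _ _ _ _
    (fun st c _ => pvCands_foldl board player w h c st)

lemma pvStep_mono (board : List (List String)) (player : String) (w h : Int)
    (st : PySem.Set (Int × Int) × List (Int × Int)) (e x : Int × Int)
    (hx : x ∈ st.1) : x ∈ (pvStep board player w h st e).1 := by
  unfold pvStep
  split
  · exact (PySem.Set.mem_add _ _ _).mpr (Or.inl hx)
  · exact hx

lemma pvScan_mono (board : List (List String)) (player : String) (w h : Int)
    (l : List (Int × Int)) (st : PySem.Set (Int × Int) × List (Int × Int)) (x : Int × Int)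
    (hx : x ∈ st.1) : x ∈ (l.foldl (pvStep board player w h) st).1 :=
  List.foldlRecOn (motive := fun st => x ∈ st.1) l _ hx
    (fun st hst e _ => pvStep_mono board player w h st e x hst)

lemma pvOuter_mono (board : List (List String)) (player : String) (w h : Int)
    (fr : List (Int × Int)) (st : PySem.Set (Int × Int) × List (Int × Int)) (x : Int × Int)
    (hx : x ∈ st.1) :
    x ∈ (fr.foldl (fun st c => (pvCands c).foldl (pvStep board player w h) st) st).1 :=
  List.foldlRecOn (motive := fun st => x ∈ st.1) fr _ hx
    (fun st hst c _ => pvScan_mono board player w h (pvCands c) st x hst)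

lemma pvScan_complete (board : List (List String)) (player : String) (w h : Int)
    (l : List (Int × Int)) (e : Int × Int) (he : e ∈ l)
    (hpass : pvPass board player w h e) :
    ∀ st, e ∈ (l.foldl (pvStep board player w h) st).1 := by
  induction l with
  | nil => cases he
  | cons a t ih =>
    intro st
    rcases List.mem_cons.mp he with rfl | he
    · simp only [List.foldl_cons]
      apply pvScan_mono
      unfold pvStep
      split
      · exact (PySem.Set.mem_add _ _ _).mpr (Or.inr rfl)
      · rename_i hcond
        by_cases hm : e ∈ st.1
        · exact hm
        · exact absurd ⟨hpass.1, hm, hpass.2⟩ hcond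
    · simp only [List.foldl_cons]
      exact ih he _

lemma pvRound_complete (board : List (List String)) (player : String) (w h : Int)
    (frontier : List (Int × Int)) (comp : PySem.Set (Int × Int))
    (f : Int × Int) (hf : f ∈ frontier) (d : Int × Int)
    (hadj : pvAdj f d) (hp : pvPass board player w h d) :
    d ∈ (pvRound board player w h frontier comp).1 := by
  rw [pvRound_eq]
  have hd : d ∈ pvCands f := pvMem_cands.mpr (by simp only [pvAdj] at hadj; omega)
  generalize (comp, ([] : List (Int × Int))) = st
  induction frontier generalizing st with
  | nil => cases hf
  | cons a t ih =>
    rcases List.mem_cons.mp hf with rfl | hf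
    · simp only [List.foldl_cons]
      apply pvOuter_mono
      exact pvScan_complete board player w h (pvCands f) d hd hp _
    · simp only [List.foldl_cons]
      exact ih hf _

-- a round keeps comp duplicate-free, and each new cell is passable and adjacent to the frontier
lemma pvRound_inv (board : List (List String)) (player : String) (w h : Int)
    (frontier : List (Int × Int)) (comp : PySem.Set (Int × Int))
    (hnd : comp.Nodup) (hfr : ∀ c ∈ frontier, c ∈ comp) :
    (pvRound board player w h frontier comp).1.Nodup ∧
    ∀ e ∈ (pvRound board player w h frontier comp).2,
      pvPass board player w h e ∧ ∃ f ∈ frontier, pvAdj f e := by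
  rw [pvRound_eq]
  have main : ∀ st : PySem.Set (Int × Int) × List (Int × Int),
      (st.1.Nodup ∧ (∀ x ∈ comp, x ∈ st.1) ∧
        ∀ e ∈ st.2, pvPass board player w h e ∧ ∃ f ∈ frontier, pvAdj f e) →
      ((frontier.foldl (fun st c => (pvCands c).foldl (pvStep board player w h) st) st).1.Nodup ∧
        (∀ x ∈ comp, x ∈
          (frontier.foldl (fun st c => (pvCands c).foldl (pvStep board player w h) st) st).1) ∧
        ∀ e ∈ (frontier.foldl (fun st c => (pvCands c).foldl (pvStep board player w h) st) st).2,
          pvPass board player w h e ∧ ∃ f ∈ frontier, pvAdj f e) := by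
    intro st hst
    refine List.foldlRecOn (motive := fun (st : PySem.Set (Int × Int) × List (Int × Int)) =>
      st.1.Nodup ∧ (∀ x ∈ comp, x ∈ st.1) ∧
      ∀ e ∈ st.2, pvPass board player w h e ∧ ∃ f ∈ frontier, pvAdj f e)
      frontier _ hst ?_
    intro st hst f hfmem
    refine List.foldlRecOn (motive := fun (st : PySem.Set (Int × Int) × List (Int × Int)) =>
      st.1.Nodup ∧ (∀ x ∈ comp, x ∈ st.1) ∧
      ∀ e ∈ st.2, pvPass board player w h e ∧ ∃ f ∈ frontier, pvAdj f e)
      (pvCands f) _ hst ?_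
    intro st hst e hemem
    obtain ⟨h1, h2, h3⟩ := hst
    unfold pvStep
    split
    · rename_i hcond
      obtain ⟨hge, hne, hve⟩ := hcond
      refine ⟨PySem.Set.nodup_add _ _ h1, ?_, ?_⟩
      · intro x hx; exact (PySem.Set.mem_add _ _ _).mpr (Or.inl (h2 x hx))
      · intro x hx
        rcases List.mem_append.mp hx with hx | hx
        · exact h3 x hx
        · rw [List.mem_singleton] at hx; subst hx
          refine ⟨⟨hge, hve⟩, f, hfmem, ?_⟩
          have hfe : x ≠ f := fun hxe => hne (hxe ▸ h2 f (hfr f hfmem))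
          have hb := pvMem_cands.mp hemem
          simp only [pvAdj]
          have : x.1 ≠ f.1 ∨ x.2 ≠ f.2 := by
            by_contra hcc
            rw [not_or] at hcc
            simp only [not_not] at hcc
            exact hfe (Prod.ext hcc.1 hcc.2)
          omega
    · exact ⟨h1, h2, h3⟩
  have res := main (comp, []) ⟨hnd, fun x hx => hx, by simp⟩
  exact ⟨res.1, res.2.2⟩

-- B's BFS loop computes exactly the cells reachable from p
lemma pvBfs_spec (board : List (List String)) (player : String) (w h : Int)
    (p : Int × Int) (hp : pvPass board player w h p) :
    ∀ (frontier : List (Int × Int)) (comp : PySem.Set (Int × Int)),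
    comp.Nodup → p ∈ comp →
    (∀ c ∈ frontier, c ∈ comp) →
    (∀ c ∈ comp, pvReach board player w h p c) →
    (∀ c ∈ comp, c ∉ frontier → ∀ d, pvAdj c d → pvPass board player w h d → d ∈ comp) →
    (pvBfs board player w h comp frontier).Nodup ∧
    (∀ c, c ∈ pvBfs board player w h comp frontier ↔ pvReach board player w h p c) := by
  intro frontier comp
  induction comp, frontier using pvBfs.induct (board := board) (player := player)
      (w := w) (h := h) with
  | case1 comp =>
    intro hnd hpm _ hreach hclos
    rw [pvBfs]
    refine ⟨hnd, fun c => ⟨fun hc => hreach c hc, fun hr => ?_⟩⟩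
    induction hr with
    | refl => exact hpm
    | @step q' d h1 h2 h3 ih => exact hclos q' ih List.not_mem_nil d h2 h3
  | case2 comp x xs ih =>
    intro hnd hpm hfm hreach hclos
    rw [pvBfs]
    obtain ⟨heq, hfresh⟩ := pvRound_grow board player w h (x :: xs) comp
    obtain ⟨hnd', hnew⟩ := pvRound_inv board player w h (x :: xs) comp hnd hfm
    refine ih hnd' ?_ ?_ ?_ ?_
    · rw [heq]; exact List.mem_append_left _ hpm
    · intro c hc; rw [heq]; exact List.mem_append_right _ hc
    · intro c hc
      rw [heq] at hc
      rcases List.mem_append.mp hc with hc | hc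
      · exact hreach c hc
      · obtain ⟨hpass, f, hfmem, hadj⟩ := hnew c hc
        exact pvReach.step (hreach f (hfm f hfmem)) hadj hpass
    · intro c hc hcn d hadj hpd
      have hcc : c ∈ comp := by
        rw [heq] at hc
        rcases List.mem_append.mp hc with hc | hc
        · exact hc
        · exact absurd hc hcn
      by_cases hcf : c ∈ x :: xs
      · exact pvRound_complete board player w h (x :: xs) comp c hcf d hadj hpd
      · rw [heq]; exact List.mem_append_left _ (hclos c hcc hcf d hadj hpd)

-- two duplicate-free lists with the same members have the same length
lemma pvLen_eq_of_mem_iff {l1 l2 : List (Int × Int)} (h1 : l1.Nodup) (h2 : l2.Nodup)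
    (hm : ∀ x, x ∈ l1 ↔ x ∈ l2) : l1.length = l2.length :=
  ((List.perm_ext_iff_of_nodup h1 h2).mpr hm).length_eq

-- the set A's flood fill returns, for a passable start
lemma pvFlood_char (board : List (List String)) (color : String) (w h : Int)
    (q : Int × Int) (hq : pvPass board color w h q) :
    (pvFloodLoop board color w h [q] []).Nodup ∧
    (∀ c, c ∈ pvFloodLoop board color w h [q] [] ↔ pvReach board color w h q c) := by
  refine pvFloodLoop_spec board color w h q [q] [] (by simp) (by simp) ?_ (by simp)
    (Or.inr (List.mem_singleton_self q))
  intro c hc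
  rw [List.mem_singleton] at hc; subst hc
  exact ⟨pvReach.refl _, hq⟩

-- the set B's BFS returns, for a passable start
lemma pvComp_char (board : List (List String)) (player : String) (w h : Int)
    (c : Int × Int) (hc : pvPass board player w h c) :
    (pvBfs board player w h (PySem.Set.add PySem.Set.empty c) [c]).Nodup ∧
    (∀ x, x ∈ pvBfs board player w h (PySem.Set.add PySem.Set.empty c) [c]
      ↔ pvReach board player w h c x) := by
  have hone : PySem.Set.add PySem.Set.empty c = [c] := by
    rw [PySem.Set.add_of_not_mem (by simp : c ∉ (PySem.Set.empty : PySem.Set (Int × Int)))]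
    rfl
  rw [hone]
  refine pvBfs_spec board player w h c hc [c] [c] (List.nodup_singleton c)
    (List.mem_singleton_self c) (fun x hx => hx) ?_ ?_
  · intro x hx
    rw [List.mem_singleton] at hx; subst hx
    exact pvReach.refl _
  · intro x hx hxn
    exact absurd hx hxn

-- A's flood-fill area from q equals the size of any duplicate-free list of q's reachable cells
lemma pvArea_eq_len (board : List (List String)) (player : String) (q : Int × Int)
    (hq : pvPass board player (PySem.List.len (board.headD [])) (PySem.List.len board) q)
    (V : List (Int × Int)) (hV : V.Nodup)
    (hm : ∀ x, x ∈ V ↔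
      pvReach board player (PySem.List.len (board.headD [])) (PySem.List.len board) q x) :
    pvFloodFillArea board q player = (V.length : Int) := by
  obtain ⟨hnd, hmem⟩ := pvFlood_char board player
    (PySem.List.len (board.headD [])) (PySem.List.len board) q hq
  unfold pvFloodFillArea
  have hlen := pvLen_eq_of_mem_iff hnd hV (fun x => (hmem x).trans (hm x).symm)
  simp only [PySem.Set.len, PySem.List.len_eq]
  exact_mod_cast hlen

lemma pvGridCells_nodup (w h : Int) : (pvGridCells w h).Nodup := by
  rw [pvGridCells, List.nodup_flatMap]
  constructor
  · intro y _
    exact (PySem.List.nodup_pyRange_one 0 w).map (fun a b hab => by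
      simpa using congrArg Prod.fst hab)
  · refine (PySem.List.pairwise_lt_pyRange_one 0 h).imp ?_
    intro y1 y2 hlt
    intro x hx1 hx2
    simp only [List.mem_map] at hx1 hx2
    obtain ⟨a, _, rfl⟩ := hx1
    obtain ⟨b, _, hb⟩ := hx2
    have := congrArg Prod.snd hb
    simp at this
    omega

-- the running total B has accumulated once `seen` covers a union of components:
-- one flood-fill area per player cell already in `seen`
def pvMu (board : List (List String)) (player : String) (w h : Int)
    (s : List (Int × Int)) : Int :=
  (((pvGridCells w h).filter (fun q => decide (pvVal board q = player) && decide (q ∈ s))).map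
    (fun q => pvFloodFillArea board q player)).sum

-- B's per-cell update, named for the induction
def pvBStep (board : List (List String)) (player : String) (w h : Int)
    (st : Int × PySem.Set (Int × Int)) (c : Int × Int) : Int × PySem.Set (Int × Int) :=
  if pvVal board c = player ∧ c ∉ st.2 then
    (st.1 + PySem.Set.len (pvBfs board player w h (PySem.Set.add PySem.Set.empty c) [c]) *
        ((pvBfs board player w h (PySem.Set.add PySem.Set.empty c) [c]).foldl
          (fun u c => if pvVal board c = player then u + 1 else u) 0),
      PySem.Set.union st.2 (pvBfs board player w h (PySem.Set.add PySem.Set.empty c) [c]))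
  else st

lemma pvFoldl_sum_if {α : Type} (l : List α) (P : α → Prop) [DecidablePred P]
    (f : α → Int) (a : Int) :
    l.foldl (fun t c => if P c then t + f c else t) a
      = a + ((l.filter (fun c => decide (P c))).map f).sum := by
  induction l generalizing a with
  | nil => simp
  | cons x t ih =>
    simp only [List.foldl_cons, List.filter_cons]
    by_cases hx : P x
    · rw [if_pos hx, ih, decide_eq_true hx]
      simp [add_assoc]
    · rw [if_neg hx, ih, decide_eq_false hx]
      simp

lemma pvSum_split {α : Type} (l : List α) (f : α → Int) (p q : α → Bool)
    (hd : ∀ x ∈ l, ¬(p x = true ∧ q x = true)) :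
    ((l.filter (fun x => p x || q x)).map f).sum
      = ((l.filter p).map f).sum + ((l.filter q).map f).sum := by
  induction l with
  | nil => simp
  | cons a t ih =>
    have ht := ih (fun x hx => hd x (List.mem_cons_of_mem _ hx))
    have ha := hd a List.mem_cons_self
    cases hpa : p a <;> cases hqa : q a
    · simp [hpa, hqa, ht]
    · simp [hpa, hqa, ht]; ring
    · simp [hpa, hqa, ht]; ring
    · exact absurd ⟨hpa, hqa⟩ ha

-- the main induction: walking any list of in-grid cells, B's accumulator stays equal to
-- the sum of A's flood-fill areas over the player cells absorbed into `seen`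
lemma pvMain (board : List (List String)) (player : String) (w h : Int)
    (hw : w = PySem.List.len (board.headD [])) (hh : h = PySem.List.len board) :
    ∀ (cs : List (Int × Int)),
    (∀ c ∈ cs, 0 ≤ c.1 ∧ c.1 < w ∧ 0 ≤ c.2 ∧ c.2 < h) →
    ∀ (t : Int) (seen : PySem.Set (Int × Int)),
    seen.Nodup →
    (∀ c ∈ seen, pvPass board player w h c) →
    (∀ c ∈ seen, ∀ d, pvReach board player w h c d → d ∈ seen) →
    t = pvMu board player w h seen →
    (cs.foldl (pvBStep board player w h) (t, seen)).2.Nodup ∧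
    (∀ c ∈ (cs.foldl (pvBStep board player w h) (t, seen)).2, pvPass board player w h c) ∧
    (∀ c ∈ (cs.foldl (pvBStep board player w h) (t, seen)).2, ∀ d,
      pvReach board player w h c d → d ∈ (cs.foldl (pvBStep board player w h) (t, seen)).2) ∧
    (∀ c ∈ seen, c ∈ (cs.foldl (pvBStep board player w h) (t, seen)).2) ∧
    (∀ c ∈ cs, pvVal board c = player → c ∈ (cs.foldl (pvBStep board player w h) (t, seen)).2) ∧
    (cs.foldl (pvBStep board player w h) (t, seen)).1
      = pvMu board player w h (cs.foldl (pvBStep board player w h) (t, seen)).2 := by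
  subst hw
  subst hh
  intro cs
  induction cs with
  | nil =>
    intro _ t seen hnd hpass hcl hmu
    simp only [List.foldl_nil]
    exact ⟨hnd, hpass, hcl, fun c hc => hc, fun c hc => absurd hc List.not_mem_nil, hmu⟩
  | cons c cs ih =>
    intro hgrid t seen hnd hpass hcl hmu
    simp only [List.foldl_cons]
    by_cases hcond : pvVal board c = player ∧ c ∉ seen
    · obtain ⟨hpl, hns⟩ := hcond
      have hcg := hgrid c List.mem_cons_self
      have hpassc : pvPass board player (PySem.List.len (board.headD []))
          (PySem.List.len board) c := ⟨hcg, Or.inr hpl⟩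
      obtain ⟨hcnd, hcm⟩ := pvComp_char board player (PySem.List.len (board.headD []))
        (PySem.List.len board) c hpassc
      set comp := pvBfs board player (PySem.List.len (board.headD []))
        (PySem.List.len board) (PySem.Set.add PySem.Set.empty c) [c] with hcompdef
      have hstep : pvBStep board player (PySem.List.len (board.headD []))
          (PySem.List.len board) (t, seen) c
          = (t + PySem.Set.len comp *
              (comp.foldl (fun u cc => if pvVal board cc = player then u + 1 else u) 0),
             PySem.Set.union seen comp) := by
        unfold pvBStep
        rw [if_pos ⟨hpl, hns⟩]
      rw [hstep]
      have hdisj : ∀ x ∈ comp, x ∉ seen := by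
        intro x hxc hxs
        exact hns (hcl x hxs c (pvReach_symm hpassc ((hcm x).mp hxc)))
      have hsubL : ∀ x ∈ comp, x ∈ pvGridCells (PySem.List.len (board.headD []))
          (PySem.List.len board) := by
        intro x hx
        rcases pvReach_pass ((hcm x).mp hx) with rfl | hpx
        · exact pvMem_gridCells.mpr hcg
        · exact pvMem_gridCells.mpr hpx.1
      have hmemu : ∀ x, x ∈ PySem.Set.union seen comp ↔ x ∈ seen ∨ x ∈ comp :=
        fun x => PySem.Set.mem_union seen comp x
      have hnd' := PySem.Set.nodup_union seen comp hnd
      have hpass' : ∀ x ∈ PySem.Set.union seen comp,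
          pvPass board player (PySem.List.len (board.headD [])) (PySem.List.len board) x := by
        intro x hx
        rcases (hmemu x).mp hx with hx | hx
        · exact hpass x hx
        · rcases pvReach_pass ((hcm x).mp hx) with rfl | hpx
          · exact hpassc
          · exact hpx
      have hcl' : ∀ x ∈ PySem.Set.union seen comp, ∀ d,
          pvReach board player (PySem.List.len (board.headD [])) (PySem.List.len board) x d →
          d ∈ PySem.Set.union seen comp := by
        intro x hx d hrd
        rcases (hmemu x).mp hx with hx | hx
        · exact (hmemu d).mpr (Or.inl (hcl x hx d hrd))
        · exact (hmemu d).mpr (Or.inr ((hcm d).mpr (pvReach_trans ((hcm x).mp hx) hrd)))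
      -- the accounting step: the new total is pvMu of the enlarged seen
      have hlenc : PySem.Set.len comp = (comp.length : Int) := by
        simp only [PySem.Set.len]
      have hunits : comp.foldl (fun u cc => if pvVal board cc = player then u + 1 else u) (0 : Int)
          = ((comp.countP (fun cc => decide (pvVal board cc = player)) : Nat) : Int) := by
        rw [PySem.List.foldl_congr_mem comp _
          (fun u cc => if (fun cc => decide (pvVal board cc = player)) cc = true then u + 1 else u)
          0 (fun acc x _ => by by_cases hpx : pvVal board x = player <;> simp [hpx])]
        rw [PySem.List.foldl_count_if]
        simp
      have harea : ∀ q ∈ (pvGridCells (PySem.List.len (board.headD []))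
            (PySem.List.len board)).filter
            (fun q => decide (pvVal board q = player) && decide (q ∈ comp)),
          pvFloodFillArea board q player = (comp.length : Int) := by
        intro q hq
        rw [List.mem_filter] at hq
        obtain ⟨hqL, hq2⟩ := hq
        simp only [Bool.and_eq_true, decide_eq_true_eq] at hq2
        obtain ⟨hqpl, hqc⟩ := hq2
        have hrcq := (hcm q).mp hqc
        have hqpass : pvPass board player (PySem.List.len (board.headD []))
            (PySem.List.len board) q := by
          rcases pvReach_pass hrcq with rfl | hp
          · exact hpassc
          · exact hp
        exact pvArea_eq_len board player q hqpass comp hcnd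
          (fun x => (hcm x).trans (pvReach_class hpassc hrcq x))
      have hcount : ((pvGridCells (PySem.List.len (board.headD []))
            (PySem.List.len board)).filter
            (fun q => decide (pvVal board q = player) && decide (q ∈ comp))).length
          = comp.countP (fun cc => decide (pvVal board cc = player)) := by
        rw [List.countP_eq_length_filter]
        apply pvLen_eq_of_mem_iff
        · exact (pvGridCells_nodup _ _).filter _
        · exact hcnd.filter _
        · intro x
          simp only [List.mem_filter, Bool.and_eq_true, decide_eq_true_eq]
          constructor
          · rintro ⟨_, hx2, hx3⟩
            exact ⟨hx3, hx2⟩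
          · rintro ⟨hx1, hx2⟩
            exact ⟨hsubL x hx1, hx2, hx1⟩
      have hmudef : pvMu board player (PySem.List.len (board.headD []))
            (PySem.List.len board) (PySem.Set.union seen comp)
          = pvMu board player (PySem.List.len (board.headD [])) (PySem.List.len board) seen
            + ((((pvGridCells (PySem.List.len (board.headD []))
                (PySem.List.len board)).filter
                (fun q => decide (pvVal board q = player) && decide (q ∈ comp))).map
                (fun q => pvFloodFillArea board q player)).sum) := by
        unfold pvMu
        rw [List.filter_congr (l := pvGridCells (PySem.List.len (board.headD []))
          (PySem.List.len board))
          (q := fun q => (decide (pvVal board q = player) && decide (q ∈ seen))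
            || (decide (pvVal board q = player) && decide (q ∈ comp)))
          (fun q _ => by
            by_cases h1 : pvVal board q = player <;> by_cases h2 : q ∈ seen <;>
              by_cases h3 : q ∈ comp <;>
              simp [PySem.Set.mem_union, h1, h2, h3])]
        exact pvSum_split _ _ _ _ (fun x hx hboth => by
          simp only [Bool.and_eq_true, decide_eq_true_eq] at hboth
          exact hdisj x hboth.2.2 hboth.1.2)
      have hmu' : t + PySem.Set.len comp *
            (comp.foldl (fun u cc => if pvVal board cc = player then u + 1 else u) 0)
          = pvMu board player (PySem.List.len (board.headD [])) (PySem.List.len board)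
              (PySem.Set.union seen comp) := by
        rw [hmudef, List.map_congr_left harea, PySem.List.sum_map_const_int, hcount,
          hlenc, hunits, hmu]
        ring
      have hres := ih (fun x hx => hgrid x (List.mem_cons_of_mem _ hx)) _ _ hnd' hpass' hcl' hmu'
      obtain ⟨r1, r2, r3, r4, r5, r6⟩ := hres
      refine ⟨r1, r2, r3, ?_, ?_, r6⟩
      · intro x hx
        exact r4 x ((hmemu x).mpr (Or.inl hx))
      · intro x hx hxpl
        rcases List.mem_cons.mp hx with rfl | hx
        · exact r4 x ((hmemu x).mpr (Or.inr ((hcm x).mpr (pvReach.refl x))))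
        · exact r5 x hx hxpl
    · have hstep : pvBStep board player (PySem.List.len (board.headD []))
          (PySem.List.len board) (t, seen) c = (t, seen) := by
        unfold pvBStep
        rw [if_neg hcond]
      rw [hstep]
      have hres := ih (fun x hx => hgrid x (List.mem_cons_of_mem _ hx)) t seen hnd hpass hcl hmu
      obtain ⟨r1, r2, r3, r4, r5, r6⟩ := hres
      refine ⟨r1, r2, r3, r4, ?_, r6⟩
      intro x hx hxpl
      rcases List.mem_cons.mp hx with rfl | hx
      · have hcs : x ∈ seen := by
          by_contra hno
          exact hcond ⟨hxpl, hno⟩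
        exact r4 x (hcs)
      · exact r5 x hx hxpl

-- the row-major double loops of both ports are folds over the grid-cell list
lemma pvDouble_foldl {β : Type} (w h : Int) (g : β → (Int × Int) → β) (init : β) :
    (PySem.List.pyRange 0 h 1).foldl (fun st y =>
      (PySem.List.pyRange 0 w 1).foldl (fun st x => g st (x, y)) st) init
    = (pvGridCells w h).foldl g init := by
  rw [pvGridCells, List.foldl_flatMap]
  simp only [List.foldl_map]

-- ===== VERDICT (by name: the statement is the Claim_ definition above) =====
theorem count_flood_fill_area_for_player_spec : Claim_equal_count_flood_fill_area_for_player := by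
  intro board player _ _
  unfold Spec_count_flood_fill_area_for_player
  set W := PySem.List.len (board.headD []) with hW
  set H := PySem.List.len board with hH
  have hA : count_flood_fill_area_for_player board player
      = (pvGridCells W H).foldl
          (fun t c => if pvVal board c = player then t + pvFloodFillArea board c player else t)
          0 :=
    pvDouble_foldl W H
      (fun t c => if pvVal board c = player then t + pvFloodFillArea board c player else t) 0
  have hB : count_flood_fill_area_for_player_alt board player
      = ((pvGridCells W H).foldl (pvBStep board player W H) (0, PySem.Set.empty)).1 :=
    congrArg Prod.fst
      (pvDouble_foldl W H (pvBStep board player W H) (0, PySem.Set.empty))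
  have hmain := pvMain board player W H hW hH (pvGridCells W H)
    (fun c hc => pvMem_gridCells.mp hc) 0 PySem.Set.empty (by simp [PySem.Set.empty])
    (by simp [PySem.Set.empty]) (by simp [PySem.Set.empty]) (by simp [pvMu, PySem.Set.empty])
  obtain ⟨_, _, _, _, hcover, hval⟩ := hmain
  have hfeq : (pvGridCells W H).filter (fun q => decide (pvVal board q = player) &&
        decide (q ∈ ((pvGridCells W H).foldl (pvBStep board player W H)
          (0, PySem.Set.empty)).2))
      = (pvGridCells W H).filter (fun q => decide (pvVal board q = player)) := by
    refine List.filter_congr ?_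
    intro q hq
    by_cases h1 : pvVal board q = player
    · simp only [h1, decide_true, Bool.true_and, decide_eq_true_eq]
      exact hcover q hq h1
    · simp [h1]
  rw [hA, hB, hval]
  rw [pvFoldl_sum_if]
  unfold pvMu
  rw [hfeq]
  simp
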